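-- pv_equiv track=rewrite | github.com/elarcanista/CP-Solutions | HackerRank/Challenges/matrix-rotation-algo.py | matrix_to_rings
-- ===== SOURCE A (Python) =====
-- def matrix_to_rings(M, R, C):
--     rings = []
--     for n_ring in range(min(R//2, C//2)):
--         corners = [
--             n_ring         + (n_ring) * 1j,
--             C - 1 - n_ring + (n_ring) * 1j,
--             C - 1 - n_ring + (R - 1 - n_ring) * 1j,
--             n_ring         + (R - 1 - n_ring) * 1j
--         ]
--         last = None
--         curr = n_ring + n_ring * 1j
--         dir = -1j
--         curr_ring = []
--         while last != corners[0]: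
--             curr_ring.append(M[int(curr.imag)][int(curr.real)])
--             if curr in corners:
--                 dir *= 1j
--             curr += dir
--             last = curr
--         rings.append(curr_ring)
--     return rings
-- ===== SOURCE B (Python) =====
-- # B: recursive layer peeling via slices instead of A's complex-number direction walk.
-- def matrix_to_rings(M, R, C):
--     if R < 2 or C < 2:
--         return []
--     return _peel([row[:C] for row in M[:R]])
--
--
-- def _peel(m):
--     if len(m) < 2 or len(m[0]) < 2:
--         return []
--     inner = m[1:-1]
--     outer = (m[0]
--              + [r[-1] for r in m[1:]]
--              + list(reversed(m[-1][:-1]))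
--              + [r[0] for r in reversed(inner)])
--     return [outer] + _peel([r[1:-1] for r in inner])
-- ===== Notes on version B (the rewrite author's own statement) =====
-- stated objective: alternative
-- what changed: Replaced the complex-number cell-by-cell direction walk with recursive layer peeling: each ring is built from four explicit row/column slices and the function recurses on the interior submatrix.
import Mathlib
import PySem

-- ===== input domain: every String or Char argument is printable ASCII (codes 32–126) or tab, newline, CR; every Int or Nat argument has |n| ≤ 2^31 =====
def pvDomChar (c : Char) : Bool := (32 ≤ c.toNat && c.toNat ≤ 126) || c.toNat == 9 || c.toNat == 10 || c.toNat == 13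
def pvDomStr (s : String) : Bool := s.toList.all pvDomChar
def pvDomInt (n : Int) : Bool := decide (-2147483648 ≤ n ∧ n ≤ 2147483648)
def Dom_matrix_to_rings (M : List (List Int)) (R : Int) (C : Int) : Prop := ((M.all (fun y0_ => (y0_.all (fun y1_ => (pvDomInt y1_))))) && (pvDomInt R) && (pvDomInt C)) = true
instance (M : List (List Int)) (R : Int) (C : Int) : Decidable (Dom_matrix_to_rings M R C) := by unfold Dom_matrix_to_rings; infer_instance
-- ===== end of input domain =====

-- B replaces A's complex-number direction walk by recursive layer peeling from slices (objective: alternative decomposition, same cost).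

-- ===== PORT A =====
-- dir * 1j on complex numbers represented as (real, imag) pairs
def pvMulI (d : Int × Int) : Int × Int := (-d.2, d.1)

-- the 'while last != corners[0]' loop; fuel only makes the recursion total (the Python loop terminates geometrically)
def pvWalkA (M : List (List Int)) (c0 : Int × Int) (corners : List (Int × Int)) :
    Nat → Option (Int × Int) → (Int × Int) → (Int × Int) → List Int → List Int
  | 0, _, _, _, acc => acc.reverse
  | fuel+1, last, curr, dir, acc =>
    if last = some c0 then acc.reverse
    else
      let v := PySem.List.pyGetD (PySem.List.pyGetD M curr.2 ([] : List Int)) curr.1 0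
      let dir' := if curr ∈ corners then pvMulI dir else dir
      let next := (curr.1 + dir'.1, curr.2 + dir'.2)
      pvWalkA M c0 corners fuel (some next) next dir' (v :: acc)

def matrix_to_rings (M : List (List Int)) (R : Int) (C : Int) : List (List Int) :=
  (PySem.List.pyRange 0 (min (PySem.Int.floordiv R 2) (PySem.Int.floordiv C 2)) 1).foldl
    (fun rings n =>
      rings ++ [pvWalkA M (n, n) [(n, n), (C - 1 - n, n), (C - 1 - n, R - 1 - n), (n, R - 1 - n)]
        ((2*(R+C)).toNat + 8) none (n, n) (0, -1) []])
    []

-- ===== PORT B =====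
def pvPeel (m : List (List Int)) : List (List Int) :=
  if m.length < 2 ∨ (PySem.List.pyGetD m 0 ([] : List Int)).length < 2 then []
  else
    let inner := PySem.List.slice m (some 1) (some (-1))
    let outer :=
      PySem.List.pyGetD m 0 [] ++
      (PySem.List.slice m (some 1) none).map (fun r => PySem.List.pyGetD r (-1) 0) ++
      (PySem.List.slice (PySem.List.pyGetD m (-1) []) none (some (-1))).reverse ++
      inner.reverse.map (fun r => PySem.List.pyGetD r 0 0)
    outer :: pvPeel (inner.map (fun r => PySem.List.slice r (some 1) (some (-1))))
termination_by m.length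
decreasing_by
  have hm : m ≠ [] := by rintro rfl; simp_all
  simp_all [PySem.List.length_slice, PySem.List.clampIdx]
  omega

def matrix_to_rings_alt (M : List (List Int)) (R : Int) (C : Int) : List (List Int) :=
  if R < 2 ∨ C < 2 then []
  else pvPeel ((PySem.List.slice M none (some R)).map (fun row => PySem.List.slice row none (some C)))

-- ===== PRECONDITION & SPEC =====
-- Pre_ is exactly A's non-raising set: A raises IndexError iff R ≥ 2, C ≥ 2 and the first R rows
-- of M do not exist or one of them is shorter than C (ring 0 alone touches column C-1 of every row < R).
def Pre_matrix_to_rings (M : List (List Int)) (R : Int) (C : Int) : Prop :=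
  R < 2 ∨ C < 2 ∨ (R.toNat ≤ M.length ∧ ∀ row ∈ M.take R.toNat, C.toNat ≤ row.length)
instance (M : List (List Int)) (R : Int) (C : Int) : Decidable (Pre_matrix_to_rings M R C) := by
  unfold Pre_matrix_to_rings; infer_instance

def pvWitness_matrix_to_rings : List (List Int) × Int × Int :=
  ([[1, 2, 3], [4, 5, 6], [7, 8, 9]], 3, 3)

def Spec_matrix_to_rings (M : List (List Int)) (R : Int) (C : Int) (out : List (List Int)) : Prop := out = matrix_to_rings_alt M R C
instance (M : List (List Int)) (R : Int) (C : Int) (out : List (List Int)) : Decidable (Spec_matrix_to_rings M R C out) := by unfold Spec_matrix_to_rings; infer_instance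

-- ===== CLAIM (what is proved, stated in full; the proofs are below) =====
def Claim_equal_matrix_to_rings : Prop := ∀ (M : List (List Int)) (R : Int) (C : Int), Dom_matrix_to_rings M R C → Pre_matrix_to_rings M R C → Spec_matrix_to_rings M R C (matrix_to_rings M R C)

-- ===== LEMMAS AND PROOFS =====

-- cell at column x, row y, as both ports read it
def pvCell (M : List (List Int)) (x y : Int) : Int :=
  PySem.List.pyGetD (PySem.List.pyGetD M y ([] : List Int)) x 0

-- the ring with corners (a,t) (b,t) (b,u) (a,u), in A's visiting order
def pvRing (g : Int → Int → Int) (a b t u : Int) : List Int :=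
  g a t :: (((List.range (b-a-1).toNat).map fun (i : Nat) => g (a+1+(i:Int)) t) ++
  g b t :: (((List.range (u-t-1).toNat).map fun (i : Nat) => g b (t+1+(i:Int))) ++
  g b u :: (((List.range (b-a-1).toNat).map fun (i : Nat) => g (b + -1 + -(i:Int)) u) ++
  g a u :: ((List.range (u-t-1).toNat).map fun (i : Nat) => g a (u + -1 + -(i:Int))))))

-- the ring at depth k of an r×c grid, in B's segment order
def pvRingB (h : Nat → Nat → Int) (r c k : Nat) : List Int :=
  ((List.range (c-2*k)).map fun j => h k (k+j)) ++
  ((List.range (r-2*k-1)).map fun i => h (k+1+i) (c-1-k)) ++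
  ((List.range (c-2*k-1)).map fun j => h (r-1-k) (c-2-k-j)) ++
  ((List.range (r-2*k-2)).map fun i => h (r-2-k-i) k)

def pvGrid (h : Nat → Nat → Int) (r c : Nat) : List (List Int) :=
  (List.range r).map fun i => (List.range c).map fun j => h i j

-- ---- generic range/map helpers ----

theorem pv_map_range_succ {α : Type} (f : Nat → α) (n : Nat) :
    (List.range (n+1)).map f = ((List.range n).map f) ++ [f n] := by
  rw [List.range_succ]; simp

theorem pv_tail_map_range {α : Type} (f : Nat → α) (n : Nat) :
    ((List.range (n+1)).map f).tail = (List.range n).map (fun i => f (i+1)) := by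
  rw [List.range_succ_eq_map]
  simp only [List.map_cons, List.tail_cons, List.map_map]
  rfl

theorem pv_dropLast_map_range {α : Type} (f : Nat → α) (n : Nat) :
    ((List.range (n+1)).map f).dropLast = (List.range n).map f := by
  rw [pv_map_range_succ]; simp

theorem pv_reverse_map_range {α : Type} (f : Nat → α) (n : Nat) :
    ((List.range n).map f).reverse = (List.range n).map (fun i => f (n-1-i)) := by
  apply List.ext_getElem
  · simp
  · intro i h1 h2
    rw [List.getElem_reverse]
    simp only [List.getElem_map, List.getElem_range, List.length_map, List.length_range]

theorem pv_map_range_split {α : Type} (f : Nat → α) (n : Nat) :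
    (List.range (n+2)).map f = f 0 :: (((List.range n).map fun i => f (i+1)) ++ [f (n+1)]) := by
  rw [pv_map_range_succ, List.range_succ_eq_map]
  simp only [List.map_cons, List.map_map, List.cons_append]
  rfl

theorem pv_clampIdx_neg_one (n : Nat) : PySem.List.clampIdx n (-1) = n - 1 := by
  simp only [PySem.List.clampIdx]
  split_ifs <;> omega

theorem pv_clampIdx_one (n : Nat) : PySem.List.clampIdx n 1 = min 1 n := by
  simp only [PySem.List.clampIdx]
  split_ifs <;> omega

theorem pv_slice_one_neg_one {α : Type} (xs : List α) :
    PySem.List.slice xs (some 1) (some (-1)) = xs.tail.dropLast := by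
  cases xs with
  | nil => simp [PySem.List.slice, PySem.List.clampIdx]
  | cons x t =>
    simp only [PySem.List.slice, pv_clampIdx_neg_one, pv_clampIdx_one, List.length_cons,
      List.tail_cons]
    rw [show min 1 (t.length + 1) = 1 from by omega]
    rw [show t.length + 1 - 1 - 1 = t.length - 1 from by omega]
    rw [List.drop_one, List.tail_cons, List.dropLast_eq_take]

-- ---- A side: the walk produces pvRing ----

theorem pvWalkA_succ (M : List (List Int)) (c0 : Int × Int) (corners : List (Int × Int))
    (f : Nat) (p d : Int × Int) (acc : List Int) (hne : p ≠ c0) :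
    pvWalkA M c0 corners (f+1) (some p) p d acc =
      pvWalkA M c0 corners f
        (some (p.1 + (if p ∈ corners then pvMulI d else d).1,
               p.2 + (if p ∈ corners then pvMulI d else d).2))
        (p.1 + (if p ∈ corners then pvMulI d else d).1,
         p.2 + (if p ∈ corners then pvMulI d else d).2)
        (if p ∈ corners then pvMulI d else d)
        (pvCell M p.1 p.2 :: acc) := by
  rw [pvWalkA]
  rw [if_neg (by simp [hne])]
  rfl

theorem pvWalkA_start (M : List (List Int)) (c0 : Int × Int) (corners : List (Int × Int))
    (f : Nat) (p d : Int × Int) (acc : List Int) :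
    pvWalkA M c0 corners (f+1) none p d acc =
      pvWalkA M c0 corners f
        (some (p.1 + (if p ∈ corners then pvMulI d else d).1,
               p.2 + (if p ∈ corners then pvMulI d else d).2))
        (p.1 + (if p ∈ corners then pvMulI d else d).1,
         p.2 + (if p ∈ corners then pvMulI d else d).2)
        (if p ∈ corners then pvMulI d else d)
        (pvCell M p.1 p.2 :: acc) := by
  rw [pvWalkA]
  rw [if_neg (by simp)]
  rfl

theorem pvWalkA_stop (M : List (List Int)) (c0 : Int × Int) (corners : List (Int × Int))
    (f : Nat) (d : Int × Int) (acc : List Int) :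
    pvWalkA M c0 corners (f+1) (some c0) c0 d acc = acc.reverse := by
  rw [pvWalkA]
  rw [if_pos rfl]

theorem pvWalkA_run (M : List (List Int)) (c0 : Int × Int) (corners : List (Int × Int))
    (d : Int × Int) :
    ∀ (n f : Nat) (p : Int × Int) (acc : List Int),
      c0 ∈ corners →
      (∀ i : Nat, i < n → (p.1 + i*d.1, p.2 + i*d.2) ∉ corners) →
      pvWalkA M c0 corners (f+n) (some p) p d acc =
        pvWalkA M c0 corners f (some (p.1+n*d.1, p.2+n*d.2)) (p.1+n*d.1, p.2+n*d.2) d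
          (((List.range n).map (fun (i : Nat) => pvCell M (p.1+(i:Int)*d.1) (p.2+(i:Int)*d.2))).reverse ++ acc) := by
  intro n
  induction n with
  | zero => intro f p acc _ _; simp
  | succ n ih =>
    intro f p acc hc0 h
    have h0 := h 0 (by omega)
    simp only [Nat.cast_zero, zero_mul, add_zero, Prod.mk.eta] at h0
    have hpne : p ≠ c0 := fun he => h0 (he ▸ hc0)
    have hfe : f + (n+1) = (f + n) + 1 := by omega
    rw [hfe, pvWalkA_succ M c0 corners (f+n) p d acc hpne, if_neg h0]
    rw [ih f (p.1 + d.1, p.2 + d.2) _ hc0 (by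
      intro i hi
      have hh := h (i+1) (by omega)
      have e1 : p.1 + ((i+1 : Nat) : Int)*d.1 = p.1 + d.1 + (i:Int)*d.1 := by push_cast; ring
      have e2 : p.2 + ((i+1 : Nat) : Int)*d.2 = p.2 + d.2 + (i:Int)*d.2 := by push_cast; ring
      rwa [e1, e2] at hh)]
    have e1 : p.1 + ((n+1 : Nat) : Int)*d.1 = p.1 + d.1 + (n:Int)*d.1 := by push_cast; ring
    have e2 : p.2 + ((n+1 : Nat) : Int)*d.2 = p.2 + d.2 + (n:Int)*d.2 := by push_cast; ring
    have e3 : ((List.range (n+1)).map (fun (i : Nat) => pvCell M (p.1+(i:Int)*d.1) (p.2+(i:Int)*d.2))).reverse ++ acc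
        = ((List.range n).map (fun (i : Nat) => pvCell M ((p.1+d.1)+(i:Int)*d.1) ((p.2+d.2)+(i:Int)*d.2))).reverse
            ++ (pvCell M p.1 p.2 :: acc) := by
      rw [List.range_succ_eq_map, List.map_cons, List.map_map, List.reverse_cons,
        List.append_assoc, List.singleton_append]
      congr 1
      · apply congrArg
        apply List.map_congr_left
        intro i _
        simp only [Function.comp_def, Nat.succ_eq_add_one]
        have a1 : p.1 + ((i+1 : Nat) : Int)*d.1 = p.1 + d.1 + (i:Int)*d.1 := by push_cast; ring
        have a2 : p.2 + ((i+1 : Nat) : Int)*d.2 = p.2 + d.2 + (i:Int)*d.2 := by push_cast; ring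
        rw [a1, a2]
      · norm_num
    rw [e1, e2, e3]

theorem pvWalkA_ring (M : List (List Int)) (a b t u : Int) (hab : a < b) (htu : t < u)
    (F : Nat) (hF : (2*(b-a) + 2*(u-t)).toNat + 1 ≤ F) :
    pvWalkA M (a,t) [(a,t),(b,t),(b,u),(a,u)] F none (a,t) (0,-1) [] =
      pvRing (pvCell M) a b t u := by
  have hc0 : ((a,t) : Int × Int) ∈ [(a,t),(b,t),(b,u),(a,u)] := by simp
  set n1 := (b-a-1).toNat with hn1def
  set n2 := (u-t-1).toNat with hn2def
  have hn1 : (n1:Int) = b-a-1 := by omega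
  have hn2 : (n2:Int) = u-t-1 := by omega
  obtain ⟨f, rfl⟩ : ∃ f, F = f + (2*n1+2*n2+5) := ⟨F - (2*n1+2*n2+5), by omega⟩
  -- first cell (a,t): corner, dir turns to (1,0)
  rw [show f + (2*n1+2*n2+5) = (f + (2*n1+2*n2+4)) + 1 from by ring]
  rw [pvWalkA_start]
  rw [if_pos hc0]
  simp only [pvMulI, neg_neg, add_zero]
  -- run right along the top row
  rw [show f + (2*n1+2*n2+4) = f + (n1+2*n2+4) + n1 from by ring]
  rw [pvWalkA_run M (a,t) [(a,t),(b,t),(b,u),(a,u)] (1,0) n1 (f + (n1+2*n2+4)) (a+1,t)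
    [pvCell M a t] hc0 (by
      intro i hi
      have hi' : (i:Int) < b-a-1 := by omega
      simp only [List.mem_cons, List.not_mem_nil, Prod.mk.injEq, mul_one, mul_zero, add_zero,
        or_false]
      omega)]
  simp only [mul_one, mul_zero, add_zero]
  rw [show a + 1 + (n1:Int) = b from by omega]
  -- corner (b,t): turn down
  rw [show f + (n1+2*n2+4) = (f + (n1+2*n2+3)) + 1 from by ring]
  rw [pvWalkA_succ M (a,t) [(a,t),(b,t),(b,u),(a,u)] (f + (n1+2*n2+3)) (b,t) (1,0) _
    (by simp only [ne_eq, Prod.mk.injEq]; omega)]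
  rw [if_pos (show ((b,t) : Int × Int) ∈ [(a,t),(b,t),(b,u),(a,u)] from by simp)]
  simp only [pvMulI, neg_zero, add_zero]
  -- run down the right column
  rw [show f + (n1+2*n2+3) = f + (n1+n2+3) + n2 from by ring]
  rw [pvWalkA_run M (a,t) [(a,t),(b,t),(b,u),(a,u)] (0,1) n2 (f + (n1+n2+3)) (b,t+1)
    _ hc0 (by
      intro i hi
      have hi' : (i:Int) < u-t-1 := by omega
      simp only [List.mem_cons, List.not_mem_nil, Prod.mk.injEq, mul_one, mul_zero, add_zero,
        or_false]
      omega)]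
  simp only [mul_one, mul_zero, add_zero]
  rw [show t + 1 + (n2:Int) = u from by omega]
  -- corner (b,u): turn left
  rw [show f + (n1+n2+3) = (f + (n1+n2+2)) + 1 from by ring]
  rw [pvWalkA_succ M (a,t) [(a,t),(b,t),(b,u),(a,u)] (f + (n1+n2+2)) (b,u) (0,1) _
    (by simp only [ne_eq, Prod.mk.injEq]; omega)]
  rw [if_pos (show ((b,u) : Int × Int) ∈ [(a,t),(b,t),(b,u),(a,u)] from by simp)]
  simp only [pvMulI, add_zero]
  -- run left along the bottom row
  rw [show f + (n1+n2+2) = f + (n2+2) + n1 from by ring]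
  rw [pvWalkA_run M (a,t) [(a,t),(b,t),(b,u),(a,u)] (-1,0) n1 (f + (n2+2)) (b + -1,u)
    _ hc0 (by
      intro i hi
      have hi' : (i:Int) < b-a-1 := by omega
      simp only [List.mem_cons, List.not_mem_nil, Prod.mk.injEq, mul_zero, add_zero,
        mul_neg_one, or_false]
      omega)]
  simp only [mul_zero, add_zero, mul_neg_one]
  rw [show b + -1 + -(n1:Int) = a from by omega]
  -- corner (a,u): turn up
  rw [show f + (n2+2) = (f + (n2+1)) + 1 from by ring]
  rw [pvWalkA_succ M (a,t) [(a,t),(b,t),(b,u),(a,u)] (f + (n2+1)) (a,u) (-1,0) _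
    (by simp only [ne_eq, Prod.mk.injEq]; omega)]
  rw [if_pos (show ((a,u) : Int × Int) ∈ [(a,t),(b,t),(b,u),(a,u)] from by simp)]
  simp only [pvMulI, neg_zero, add_zero]
  -- run up the left column
  rw [show f + (n2+1) = (f+1) + n2 from by ring]
  rw [pvWalkA_run M (a,t) [(a,t),(b,t),(b,u),(a,u)] (0,-1) n2 (f + 1) (a,u + -1)
    _ hc0 (by
      intro i hi
      have hi' : (i:Int) < u-t-1 := by omega
      simp only [List.mem_cons, List.not_mem_nil, Prod.mk.injEq, mul_zero, add_zero,
        mul_neg_one, or_false]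
      omega)]
  simp only [mul_zero, add_zero, mul_neg_one]
  rw [show u + -1 + -(n2:Int) = t from by omega]
  -- arrived back at corners[0]: stop
  rw [pvWalkA_stop]
  simp only [pvRing, List.reverse_append, List.reverse_cons, List.reverse_reverse,
    List.append_assoc, List.cons_append, List.nil_append, List.reverse_nil]
  rw [hn1def, hn2def]

theorem pv_hcongr {h : Nat → Nat → Int} {a b x y : Nat} (e1 : a = x) (e2 : b = y) :
    h a b = h x y := by rw [e1, e2]

theorem pv_pyGetD_zero_map_range {α : Type} (f : Nat → α) (n : Nat) (d : α) (hn : 0 < n) :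
    PySem.List.pyGetD ((List.range n).map f) 0 d = f 0 := by
  obtain ⟨m, rfl⟩ : ∃ m, n = m+1 := ⟨n-1, by omega⟩
  rw [List.range_succ_eq_map, List.map_cons, PySem.List.pyGetD_zero_cons]

theorem pv_pyGetD_neg_one_map_range {α : Type} (f : Nat → α) (n : Nat) (d : α) (hn : 0 < n) :
    PySem.List.pyGetD ((List.range n).map f) (-1) d = f (n-1) := by
  obtain ⟨m, rfl⟩ : ∃ m, n = m+1 := ⟨n-1, by omega⟩
  rw [pv_map_range_succ, PySem.List.pyGetD_neg_one_append_singleton]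
  congr 1

theorem pvRingB_shift (h : Nat → Nat → Int) (r c k : Nat) (hkr : 2*k+2 ≤ r) (hkc : 2*k+2 ≤ c) :
    pvRingB (fun i j => h (i+1) (j+1)) r c k = pvRingB h (r+1+1) (c+1+1) (k+1) := by
  simp only [pvRingB]
  rw [show (c+1+1)-2*(k+1) = c-2*k from by omega,
      show (r+1+1)-2*(k+1) = r-2*k from by omega]
  refine congrArg₂ (· ++ ·) (congrArg₂ (· ++ ·) (congrArg₂ (· ++ ·) ?_ ?_) ?_) ?_
  · exact List.map_congr_left fun j _ => pv_hcongr rfl (by omega)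
  · exact List.map_congr_left fun i _ => pv_hcongr (by omega) (by omega)
  · exact List.map_congr_left fun j hj => by
      simp only [List.mem_range] at hj
      exact pv_hcongr (by omega) (by omega)
  · exact List.map_congr_left fun i hi => by
      simp only [List.mem_range] at hi
      exact pv_hcongr (by omega) (by omega)

-- ---- B side: peel of a grid ----

theorem pvPeel_grid : ∀ (r c : Nat) (h : Nat → Nat → Int),
    pvPeel (pvGrid h r c) = (List.range (min r c / 2)).map (fun k => pvRingB h r c k) := by
  intro r
  induction r using Nat.strong_induction_on with
  | _ r ih =>
    intro c h
    by_cases hr : r < 2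
    · rw [pvPeel.eq_def]
      rw [if_pos (Or.inl (by simp [pvGrid]; omega))]
      rw [show min r c / 2 = 0 from by omega]
      simp
    · by_cases hc : c < 2
      · rw [pvPeel.eq_def]
        rw [if_pos (Or.inr (by
          rw [show PySem.List.pyGetD (pvGrid h r c) 0 [] = (List.range c).map (fun j => h 0 j)
            from pv_pyGetD_zero_map_range _ _ _ (by omega)]
          simp
          omega))]
        rw [show min r c / 2 = 0 from by omega]
        simp
      · obtain ⟨r2, rfl⟩ : ∃ m, r = m+1+1 := ⟨r-2, by omega⟩
        obtain ⟨c2, rfl⟩ : ∃ m, c = m+1+1 := ⟨c-2, by omega⟩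
        have e_len : (pvGrid h (r2+1+1) (c2+1+1)).length = r2+1+1 := by simp [pvGrid]
        have e_row0 : PySem.List.pyGetD (pvGrid h (r2+1+1) (c2+1+1)) 0 []
            = (List.range (c2+1+1)).map (fun j => h 0 j) :=
          pv_pyGetD_zero_map_range _ _ _ (by omega)
        have e_tail : PySem.List.slice (pvGrid h (r2+1+1) (c2+1+1)) (some 1) none
            = (List.range (r2+1)).map (fun i => (List.range (c2+1+1)).map (fun j => h (i+1) j)) := by
          rw [PySem.List.slice_from_one]
          exact pv_tail_map_range _ _
        have e_last : PySem.List.pyGetD (pvGrid h (r2+1+1) (c2+1+1)) (-1) []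
            = (List.range (c2+1+1)).map (fun j => h (r2+1) j) := by
          have := pv_pyGetD_neg_one_map_range
            (fun i => (List.range (c2+1+1)).map (fun j => h i j)) (r2+1+1) [] (by omega)
          simpa using this
        have e_inner : PySem.List.slice (pvGrid h (r2+1+1) (c2+1+1)) (some 1) (some (-1))
            = (List.range r2).map (fun i => (List.range (c2+1+1)).map (fun j => h (i+1) j)) := by
          rw [pv_slice_one_neg_one]
          rw [show (pvGrid h (r2+1+1) (c2+1+1)).tail
              = (List.range (r2+1)).map (fun i => (List.range (c2+1+1)).map (fun j => h (i+1) j))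
            from pv_tail_map_range _ _]
          exact pv_dropLast_map_range _ _
        have e_rec : ((List.range r2).map
              (fun i => (List.range (c2+1+1)).map (fun j => h (i+1) j))).map
              (fun row => PySem.List.slice row (some 1) (some (-1)))
            = pvGrid (fun i j => h (i+1) (j+1)) r2 c2 := by
          rw [List.map_map]
          apply List.map_congr_left
          intro i _
          show PySem.List.slice ((List.range (c2+1+1)).map (fun j => h (i+1) j))
              (some 1) (some (-1)) = (List.range c2).map (fun j => h (i+1) (j+1))
          rw [pv_slice_one_neg_one]
          rw [show ((List.range (c2+1+1)).map (fun j => h (i+1) j)).tail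
              = (List.range (c2+1)).map (fun j => h (i+1) (j+1)) from pv_tail_map_range _ _]
          exact pv_dropLast_map_range _ _
        rw [pvPeel.eq_def]
        rw [if_neg (by rw [e_len, e_row0]; simp)]
        simp only [e_row0, e_tail, e_last, e_inner]
        rw [e_rec, ih r2 (by omega) c2 (fun i j => h (i+1) (j+1))]
        rw [show min (r2+1+1) (c2+1+1) / 2 = min r2 c2 / 2 + 1 from by omega]
        rw [List.range_succ_eq_map (n := min r2 c2 / 2), List.map_cons]
        congr 1
        · -- the outer ring is ring 0
          simp only [pvRingB]
          rw [show (c2+1+1)-2*0 = c2+1+1 from by omega,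
              show (r2+1+1)-2*0 = r2+1+1 from by omega,
              show (r2+1+1)-1 = r2+1 from by omega,
              show (c2+1+1)-1 = c2+1 from by omega,
              show (r2+1+1)-2 = r2 from by omega]
          refine congrArg₂ (· ++ ·) (congrArg₂ (· ++ ·) (congrArg₂ (· ++ ·) ?_ ?_) ?_) ?_
          · exact List.map_congr_left fun j _ => pv_hcongr rfl (by omega)
          · rw [List.map_map]
            exact List.map_congr_left fun i hi => by
              simp only [List.mem_range] at hi
              exact (pv_pyGetD_neg_one_map_range _ _ _ (by omega)).trans
                (pv_hcongr (by omega) (by omega))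
          · rw [PySem.List.slice_to_neg_one, pv_dropLast_map_range, pv_reverse_map_range]
            exact List.map_congr_left fun j hj => by
              simp only [List.mem_range] at hj
              exact pv_hcongr (by omega) (by omega)
          · rw [pv_reverse_map_range, List.map_map]
            exact List.map_congr_left fun i hi => by
              simp only [List.mem_range] at hi
              exact (pv_pyGetD_zero_map_range _ _ _ (by omega)).trans
                (pv_hcongr (by omega) rfl)
        · rw [List.map_map]
          exact List.map_congr_left fun k hk => by
            simp only [List.mem_range] at hk
            exact pvRingB_shift h r2 c2 k (by omega) (by omega)

-- ---- bridging ----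

theorem pvRing_eq_ringB (M : List (List Int)) (r c k : Nat)
    (hr : 2*k+2 ≤ r) (hc : 2*k+2 ≤ c) :
    pvRing (pvCell M) (k : Int) ((c:Int)-1-(k:Int)) (k : Int) ((r:Int)-1-(k:Int)) =
      pvRingB (fun i j => (M.getD i ([] : List Int)).getD j 0) r c k := by
  obtain ⟨m1, hm1⟩ : ∃ m, c-2*k = m+2 := ⟨c-2*k-2, by omega⟩
  obtain ⟨m2, hm2⟩ : ∃ m, r-2*k-1 = m+1 := ⟨r-2*k-2, by omega⟩
  have ecell : ∀ (x y : Nat) (xi yi : Int), xi = (x:Int) → yi = (y:Int) →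
      pvCell M xi yi = (M.getD y ([] : List Int)).getD x 0 := by
    intro x y xi yi hx hy
    rw [hx, hy]
    simp [pvCell, PySem.List.pyGetD_natCast]
  simp only [pvRing, pvRingB]
  rw [show ((c:Int)-1-(k:Int)-(k:Int)-1).toNat = m1 from by omega,
      show ((r:Int)-1-(k:Int)-(k:Int)-1).toNat = m2 from by omega,
      hm1, hm2,
      show (m1+2)-1 = m1+1 from by omega,
      show r-2*k-2 = m2 from by omega]
  rw [pv_map_range_split _ m1, pv_map_range_succ _ m2, pv_map_range_succ _ m1]
  simp only [List.cons_append, List.append_assoc, List.nil_append]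
  congr 1
  · exact ecell (k+0) k _ _ (by omega) (by omega)
  congr 1
  · exact List.map_congr_left fun j hj => by
      simp only [List.mem_range] at hj
      exact ecell (k+(j+1)) k _ _ (by push_cast; omega) (by omega)
  congr 1
  · exact ecell (k+(m1+1)) k _ _ (by omega) (by omega)
  congr 1
  · exact List.map_congr_left fun i hi => by
      simp only [List.mem_range] at hi
      exact ecell (c-1-k) (k+1+i) _ _ (by omega) (by push_cast; omega)
  congr 1
  · exact ecell (c-1-k) (k+1+m2) _ _ (by omega) (by omega)
  congr 1
  · exact List.map_congr_left fun j hj => by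
      simp only [List.mem_range] at hj
      exact ecell (c-2-k-j) (r-1-k) _ _ (by omega) (by omega)
  congr 1
  · exact ecell (c-2-k-m1) (r-1-k) _ _ (by omega) (by omega)
  · exact List.map_congr_left fun i hi => by
      simp only [List.mem_range] at hi
      exact ecell k (r-2-k-i) _ _ (by omega) (by omega)

theorem pv_grid_eq (M : List (List Int)) (r c : Nat) (hlen : r ≤ M.length)
    (hrow : ∀ row ∈ M.take r, c ≤ row.length) :
    (M.take r).map (fun row => row.take c) =
      pvGrid (fun i j => (M.getD i ([] : List Int)).getD j 0) r c := by
  have hrow' : ∀ i, (hi : i < r) → c ≤ (M[i]'(by omega)).length := by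
    intro i hi
    have h1 : i < (M.take r).length := by simp; omega
    have h2 := hrow ((M.take r)[i]'h1) (List.getElem_mem h1)
    simpa [List.getElem_take] using h2
  apply List.ext_getElem
  · simp [pvGrid]; omega
  · intro i h1 h2
    simp only [pvGrid, List.length_map, List.length_range] at h2
    simp only [pvGrid, List.getElem_map, List.getElem_range, List.getElem_take]
    have hgd : M.getD i ([] : List Int) = M[i]'(by omega) := by
      rw [List.getD_eq_getElem?_getD, List.getElem?_eq_getElem (by omega)]
      rfl
    apply List.ext_getElem
    · simp only [List.length_take, List.length_map, List.length_range]
      have := hrow' i h2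
      omega
    · intro j hj1 hj2
      simp only [List.getElem_take, List.getElem_map, List.getElem_range]
      rw [hgd]
      have hjc : j < c := by simpa using hj2
      have hjl : j < (M[i]'(by omega)).length := by have := hrow' i h2; omega
      rw [List.getD_eq_getElem?_getD, List.getElem?_eq_getElem hjl]
      rfl

-- ===== VERDICT (by name: the statement is the Claim_ definition above) =====
theorem matrix_to_rings_spec : Claim_equal_matrix_to_rings := by
  unfold Claim_equal_matrix_to_rings
  intro M R C _ hpre
  unfold Spec_matrix_to_rings matrix_to_rings matrix_to_rings_alt
  by_cases hsm : R < 2 ∨ C < 2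
  · rw [if_pos hsm]
    rw [PySem.Int.floordiv_eq_ediv_of_pos (by norm_num : (0:Int) < 2),
        PySem.Int.floordiv_eq_ediv_of_pos (by norm_num : (0:Int) < 2)]
    rw [PySem.List.pyRange_one_eq_nil (show min (R/2) (C/2) ≤ 0 from by omega)]
    rfl
  · rw [if_neg hsm]
    have hshape : R.toNat ≤ M.length ∧ ∀ row ∈ M.take R.toNat, C.toNat ≤ row.length := by
      rcases hpre with h|h|h
      · omega
      · omega
      · exact h
    obtain ⟨r, hr⟩ : ∃ n : Nat, R = (n:Int) := ⟨R.toNat, by omega⟩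
    obtain ⟨c, hc⟩ : ∃ n : Nat, C = (n:Int) := ⟨C.toNat, by omega⟩
    subst hr; subst hc
    simp only [Int.toNat_natCast] at hshape
    rw [PySem.List.slice_to M (show (0:Int) ≤ ((r:Nat):Int) from by omega)]
    rw [show (fun row : List Int => PySem.List.slice row none (some ((c:Nat):Int)))
        = (fun row : List Int => row.take c) from funext fun row => by
      rw [PySem.List.slice_to row (show (0:Int) ≤ ((c:Nat):Int) from by omega), Int.toNat_natCast]]
    rw [Int.toNat_natCast]
    rw [pv_grid_eq M r c hshape.1 hshape.2]
    rw [pvPeel_grid]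
    rw [PySem.Int.floordiv_eq_ediv_of_pos (by norm_num : (0:Int) < 2),
        PySem.Int.floordiv_eq_ediv_of_pos (by norm_num : (0:Int) < 2)]
    rw [PySem.List.pyRange_one]
    rw [PySem.List.foldl_append_singleton_eq_map]
    rw [List.nil_append, List.map_map]
    rw [show ((min (((r:Nat):Int)/2) (((c:Nat):Int)/2)) - 0).toNat = min r c / 2 from by omega]
    apply List.map_congr_left
    intro k hk
    simp only [List.mem_range] at hk
    simp only [Function.comp_def, zero_add]
    rw [pvWalkA_ring M (k:Int) (((c:Nat):Int)-1-(k:Int)) (k:Int) (((r:Nat):Int)-1-(k:Int))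
      (by omega) (by omega) _ (by omega)]
    exact pvRing_eq_ringB M r c k (by omega) (by omega)
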